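-- pv_equiv track=rewrite | github.com/sadki-mdsol/DSA_Program | Array/Who_likes_it.py | likes
-- ===== SOURCE A (Python) =====
-- def likes(names):
--     people = ""
--     if len(names) == 0:
--         people = "no one"
--
--     for i in range(len(names)):
--         # if len(names) == 1:
--         #     people = names[i]
--         people = people + names[i]
--         if i == len(names)-2 and len(names)!=1:
--             people = people + ' and '
--         elif i< len(names)-2:
--             people = people +', '
--
--         # if len(names) == 1:
--         #     people += names[i]
--         # elif i == len(names)-1:
--         #     people = people +" and " + names[i]
--         # elif i< len(names)-1:
--         #     people = people+ names[i]+", "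
--
--
--     return people+" likes it"
-- ===== SOURCE B (Python) =====
-- def likes(names):
--     if len(names) == 0:
--         return "no one likes it"
--     if len(names) == 1:
--         return names[0] + " likes it"
--     return ", ".join(names[:-1]) + " and " + names[-1] + " likes it"
-- ===== Notes on version B (the rewrite author's own statement) =====
-- stated objective: simpler
-- what changed: Replaces A's index loop with per-iteration separator conditionals by a length-case dispatch plus a single ', '.join over names[:-1].
import Mathlib
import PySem

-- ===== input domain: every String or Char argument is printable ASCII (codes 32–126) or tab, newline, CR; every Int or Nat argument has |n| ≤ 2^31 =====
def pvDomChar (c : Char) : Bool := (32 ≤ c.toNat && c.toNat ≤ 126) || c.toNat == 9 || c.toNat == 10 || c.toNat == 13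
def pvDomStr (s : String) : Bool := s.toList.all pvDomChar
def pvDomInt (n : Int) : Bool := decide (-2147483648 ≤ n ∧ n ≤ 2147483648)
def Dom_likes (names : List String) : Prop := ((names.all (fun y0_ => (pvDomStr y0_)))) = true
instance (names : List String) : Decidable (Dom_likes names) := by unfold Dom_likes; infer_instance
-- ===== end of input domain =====

-- B replaces A's index loop (with per-index separator conditionals) by a
-- length-case dispatch plus a single ", ".join over names[:-1]; objective: simpler.

-- ===== PORT A =====
-- the for-loop of A: for i in range(len(names)): people += names[i]; separator branches
def likesLoop (names : List String) (p : String) : String :=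
  (PySem.List.pyRange 0 (names.length : Int) 1).foldl
    (fun people i =>
      let people := people ++ PySem.List.pyGetD names i ""
      if i = (names.length : Int) - 2 ∧ (names.length : Int) ≠ 1 then people ++ " and "
      else if i < (names.length : Int) - 2 then people ++ ", "
      else people) p

def likes (names : List String) : String :=
  likesLoop names (if names.length = 0 then "no one" else "") ++ " likes it"

-- ===== PORT B =====
def likes_alt (names : List String) : String :=
  match names with
  | [] => "no one likes it"
  | [x] => x ++ " likes it"
  | _ =>
      PySem.Str.join ", " (PySem.List.slice names none (some (-1))) ++ " and " ++
        PySem.List.pyGetD names (-1) "" ++ " likes it"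

-- ===== PRECONDITION & SPEC =====
def Spec_likes (names : List String) (out : String) : Prop := out = likes_alt names
instance (names : List String) (out : String) : Decidable (Spec_likes names out) := by unfold Spec_likes; infer_instance

-- ===== CLAIM (what is proved, stated in full; the proofs are below) =====
def Claim_equal_likes : Prop := ∀ (names : List String), Dom_likes names → Spec_likes names (likes names)

-- ===== LEMMAS AND PROOFS =====

-- names[-1] on a nonempty list is the last element
theorem pyGetD_neg_one_last (xs : List String) (d : String) (h : xs ≠ []) :
    PySem.List.pyGetD xs (-1) d = xs.getLast?.getD d := by
  have hl : 1 ≤ xs.length := List.length_pos_of_ne_nil h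
  simp [PySem.List.pyGetD, PySem.List.pyGet?, PySem.List.pyIdx?, hl,
    List.getLast?_eq_getElem?]

theorem join_cons_ne (s a : String) (t : List String) (h : t ≠ []) :
    PySem.Str.join s (a :: t) = a ++ s ++ PySem.Str.join s t := by
  rcases t with _ | ⟨b, t⟩
  · exact absurd rfl h
  · simp [PySem.Str.join, PySem.Chars.join, List.intercalate, String.append_assoc]

theorem join_singleton (s a : String) : PySem.Str.join s [a] = a := by
  simp [PySem.Str.join, PySem.Chars.join, List.intercalate]

-- peeling the first loop iteration shifts the whole loop by one index
theorem loop_shift (a : String) (ys : List String) (p : String) (h : 2 ≤ ys.length) :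
    likesLoop (a :: ys) p = likesLoop ys (p ++ a ++ ", ") := by
  unfold likesLoop
  have hL : (2 : Int) ≤ (ys.length : Int) := by exact_mod_cast h
  have hn : ((a :: ys).length : Int) = (ys.length : Int) + 1 := by
    push_cast [List.length_cons]; ring
  rw [hn, PySem.List.pyRange_one_cons (by omega)]
  rw [List.foldl_cons]
  simp only [zero_add]
  have h0 : ((0 : Int) = (ys.length : Int) + 1 - 2 ∧ ((ys.length : Int) + 1) ≠ 1) = False := by
    simp only [eq_iff_iff, iff_false]; omega
  have h0' : ((0 : Int) < (ys.length : Int) + 1 - 2) = True := by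
    simp only [eq_iff_iff, iff_true]; omega
  simp only [h0, h0', if_true, if_false, PySem.List.pyGetD_ofNat', List.getD_cons_zero]
  have e1n : (((ys.length : Int) + 1) - 1).toNat = ys.length := by omega
  have e0n : ((ys.length : Int) - 0).toNat = ys.length := by omega
  have hr1 : PySem.List.pyRange 1 ((ys.length : Int) + 1) 1 =
      (List.range (ys.length)).map (fun k : Nat => (1 : Int) + (k : Int)) := by
    rw [PySem.List.pyRange_one, e1n]
  have hr0 : PySem.List.pyRange 0 ((ys.length : Int)) 1 =
      (List.range (ys.length)).map (fun k : Nat => (0 : Int) + (k : Int)) := by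
    rw [PySem.List.pyRange_one, e0n]
  rw [hr1, hr0, List.foldl_map, List.foldl_map]
  apply PySem.List.foldl_congr_mem
  intro acc k hk
  have hk' : k < ys.length := List.mem_range.mp hk
  have e1 : (1 : Int) + k = ((k + 1 : Nat) : Int) := by omega
  have e0 : (0 : Int) + k = ((k : Nat) : Int) := by omega
  rw [e1, e0, PySem.List.pyGetD_natCast, PySem.List.pyGetD_natCast]
  have c1 : (((k + 1 : Nat) : Int) = (ys.length : Int) + 1 - 2 ∧ ((ys.length : Int) + 1) ≠ 1)
      = (((k : Nat) : Int) = (ys.length : Int) - 2 ∧ ((ys.length : Int)) ≠ 1) := by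
    simp only [eq_iff_iff]; constructor <;> (intro ⟨h1, _⟩; exact ⟨by omega, by omega⟩)
  have c2 : (((k + 1 : Nat) : Int) < (ys.length : Int) + 1 - 2)
      = (((k : Nat) : Int) < (ys.length : Int) - 2) := by
    simp only [eq_iff_iff]; omega
  simp only [c1, c2, List.getD_cons_succ]

-- the loop on a list of length ≥ 2 produces the comma/and-joined string
theorem loop_main (names : List String) : ∀ (p : String), 2 ≤ names.length →
    likesLoop names p =
      p ++ PySem.Str.join ", " names.dropLast ++ " and " ++ names.getLast?.getD "" := by
  induction names with
  | nil => intro p h; simp at h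
  | cons a ys ih =>
    intro p h
    rcases ys with _ | ⟨b, t⟩
    · simp at h
    rcases t with _ | ⟨c, t⟩
    · -- base case [a, b]
      have hr : PySem.List.pyRange 0 (2 : Int) 1 = [0, 1] := by decide
      unfold likesLoop
      rw [show (([a, b] : List String).length : Int) = 2 from by simp]
      rw [hr]
      simp only [List.foldl_cons, List.foldl_nil]
      norm_num [PySem.List.pyGetD_ofNat', join_singleton, String.append_assoc]
    · -- step: length ≥ 3
      rw [loop_shift a (b :: c :: t) p (by simp)]
      rw [ih (p ++ a ++ ", ") (by simp)]
      have hdl : (a :: b :: c :: t).dropLast = a :: (b :: c :: t).dropLast := rfl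
      rw [hdl, join_cons_ne ", " a _ (by simp [List.dropLast_cons₂])]
      have hgl : (a :: b :: c :: t).getLast? = (b :: c :: t).getLast? := by
        simp [List.getLast?_cons_cons]
      rw [hgl]
      simp [String.append_assoc]

-- ===== VERDICT (by name: the statement is the Claim_ definition above) =====
theorem likes_spec : Claim_equal_likes := by
  intro names _
  unfold Spec_likes
  rcases names with _ | ⟨a, ys⟩
  · decide
  rcases ys with _ | ⟨b, t⟩
  · show likesLoop [a] (if ([a] : List String).length = 0 then "no one" else "") ++ " likes it"
        = a ++ " likes it"
    have hr : PySem.List.pyRange 0 (1 : Int) 1 = [0] := by decide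
    unfold likesLoop
    rw [show (([a] : List String).length : Int) = 1 from by simp]
    rw [hr]
    simp only [List.foldl_cons, List.foldl_nil]
    norm_num [PySem.List.pyGetD_ofNat']
  · show likesLoop (a :: b :: t) (if (a :: b :: t : List String).length = 0 then "no one" else "")
        ++ " likes it" = _
    rw [if_neg (by simp)]
    rw [loop_main (a :: b :: t) "" (by simp)]
    show _ = PySem.Str.join ", " (PySem.List.slice (a :: b :: t) none (some (-1))) ++ " and " ++
        PySem.List.pyGetD (a :: b :: t) (-1) "" ++ " likes it"
    rw [PySem.List.slice_to_neg_one, pyGetD_neg_one_last _ _ (by simp)]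
    simp [String.append_assoc]
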